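-- pv_equiv track=rewrite | github.com/EmilMachine/pyplan | read_and_present_data_1.py | get_task_lookup
-- ===== SOURCE A (Python) =====
-- def get_task_lookup(task_lst, tasks_lst_of_lst):
--     # lst = list.
--     # taskes a list of tasks_list and make a lookup table
--     # the lookuptable can be used to enter a task id, and get the ids of the list of lists, where the task is in.
--     n_tasks = len(task_lst)
--
--     task_combi_lookup = []
--
--     # TODO can maybe be rewritten to list comprehention
--     # loop over tasks (we assumme all tasks are numbered from 1 to n)
--     for task in range(0,n_tasks):
--         tmp = []
--         # take a list of list (e.g. cotasks_master)
--         for entry_id,entry in enumerate(tasks_lst_of_lst):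
--             # for each entry check if our task is one of them
--             # if it is add that entry id_number to our lookup table for that task.
--             if task in entry:
--                 tmp.append(entry_id)
--         # After inner iteration inner lookup is complete.
--         # The lookup list is added to the list.
--         # (since we do them in order, the id of task and lookup will match)
--         task_combi_lookup.append(tmp)
--
--     return task_combi_lookup
-- ===== SOURCE B (Python) =====
-- def get_task_lookup(task_lst, tasks_lst_of_lst):
--     # Single pass over the entries: bucket each in-range element to its task's
--     # list, deduplicating per entry, instead of scanning every entry per task.
--     n = len(task_lst)
--     buckets = [[] for _ in range(n)]
--     for entry_id, entry in enumerate(tasks_lst_of_lst):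
--         seen = set()
--         for t in entry:
--             if 0 <= t < n and t not in seen:
--                 seen.add(t)
--                 buckets[t].append(entry_id)
--     return buckets
-- ===== Notes on version B (the rewrite author's own statement) =====
-- stated objective: faster
-- what changed: Instead of scanning every entry once per task (nested loops over tasks x entries), B makes a single pass over the entries and buckets each in-range element into its task's list with per-entry deduplication.
import Mathlib
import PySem

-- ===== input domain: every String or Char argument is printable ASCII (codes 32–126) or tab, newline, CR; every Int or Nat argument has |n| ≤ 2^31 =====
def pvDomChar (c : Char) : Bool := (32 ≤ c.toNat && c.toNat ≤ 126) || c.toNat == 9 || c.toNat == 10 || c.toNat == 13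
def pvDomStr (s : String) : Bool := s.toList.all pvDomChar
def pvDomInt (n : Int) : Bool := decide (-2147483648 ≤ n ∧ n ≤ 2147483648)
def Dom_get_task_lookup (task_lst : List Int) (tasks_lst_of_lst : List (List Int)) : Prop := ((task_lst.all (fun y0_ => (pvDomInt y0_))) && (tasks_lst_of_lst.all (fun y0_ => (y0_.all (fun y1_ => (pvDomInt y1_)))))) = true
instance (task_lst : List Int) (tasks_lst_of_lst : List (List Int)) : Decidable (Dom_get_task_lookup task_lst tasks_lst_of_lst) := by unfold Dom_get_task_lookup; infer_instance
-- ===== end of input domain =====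

-- B replaces A's per-task scan of all entries by one pass over the entries that
-- buckets each in-range element to its task's list (deduplicated per entry): asymptotically faster.

-- ===== PORT A =====
-- literal transliteration of A: for task in range(0, n_tasks): tmp = []; for entry_id, entry in
-- enumerate(tasks_lst_of_lst): if task in entry: tmp.append(entry_id); lookup.append(tmp)
def get_task_lookup (task_lst : List Int) (tasks_lst_of_lst : List (List Int)) : List (List Int) :=
  let n_tasks : Int := task_lst.length
  (PySem.List.pyRange 0 n_tasks 1).foldl
    (fun task_combi_lookup task =>
      task_combi_lookup ++
        [(PySem.List.enumerate tasks_lst_of_lst).foldl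
           (fun tmp p => if task ∈ p.2 then tmp ++ [p.1] else tmp) []])
    []

-- ===== PORT B =====
-- inner loop of B: for t in entry: if 0 <= t < n and t not in seen: seen.add(t); buckets[t].append(entry_id)
def altInner (n : Int) (entry_id : Int) (entry : List Int)
    (st : List (List Int) × PySem.Set Int) : List (List Int) × PySem.Set Int :=
  entry.foldl
    (fun st t =>
      if 0 ≤ t ∧ t < n ∧ t ∉ st.2 then
        (st.1.set t.toNat ((st.1.getD t.toNat []) ++ [entry_id]), PySem.Set.add st.2 t)
      else st)
    st

def get_task_lookup_alt (task_lst : List Int) (tasks_lst_of_lst : List (List Int)) : List (List Int) :=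
  let n : Int := task_lst.length
  (PySem.List.enumerate tasks_lst_of_lst).foldl
    (fun buckets p => (altInner n p.1 p.2 (buckets, PySem.Set.ofList [])).1)
    (List.replicate task_lst.length [])

-- ===== PRECONDITION & SPEC =====
def Spec_get_task_lookup (task_lst : List Int) (tasks_lst_of_lst : List (List Int)) (out : List (List Int)) : Prop := out = get_task_lookup_alt task_lst tasks_lst_of_lst
instance (task_lst : List Int) (tasks_lst_of_lst : List (List Int)) (out : List (List Int)) : Decidable (Spec_get_task_lookup task_lst tasks_lst_of_lst out) := by unfold Spec_get_task_lookup; infer_instance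

-- ===== CLAIM (what is proved, stated in full; the proofs are below) =====
def Claim_equal_get_task_lookup : Prop := ∀ (task_lst : List Int) (tasks_lst_of_lst : List (List Int)), Dom_get_task_lookup task_lst tasks_lst_of_lst → Spec_get_task_lookup task_lst tasks_lst_of_lst (get_task_lookup task_lst tasks_lst_of_lst)

-- ===== LEMMAS AND PROOFS =====

-- A's inner loop is a filter-then-project over the enumerated entries.
lemma a_inner_eq (task : Int) (l : List (Int × List Int)) (init : List Int) :
    l.foldl (fun tmp p => if task ∈ p.2 then tmp ++ [p.1] else tmp) init
      = init ++ (l.filter (fun p => decide (task ∈ p.2))).map (·.1) := by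
  induction l generalizing init with
  | nil => simp
  | cons p l ih =>
    simp only [List.foldl_cons, List.filter_cons]
    by_cases h : task ∈ p.2 <;> simp [h, ih]

-- A is a map over the task range.
lemma a_eq_map (task_lst : List Int) (tll : List (List Int)) :
    get_task_lookup task_lst tll
      = (PySem.List.pyRange 0 (task_lst.length : Int) 1).map (fun task =>
          ((PySem.List.enumerate tll).filter (fun p => decide (task ∈ p.2))).map (·.1)) := by
  unfold get_task_lookup
  rw [PySem.List.foldl_append_singleton_eq_map]
  simp only [List.nil_append]
  exact List.map_congr_left (fun task _ => by rw [a_inner_eq]; simp)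

-- one step of B's inner fold, kept folded
lemma altInner_cons (n eid x : Int) (xs : List Int) (st : List (List Int) × PySem.Set Int) :
    altInner n eid (x :: xs) st
      = altInner n eid xs
          (if 0 ≤ x ∧ x < n ∧ x ∉ st.2 then
            (st.1.set x.toNat ((st.1.getD x.toNat []) ++ [eid]), PySem.Set.add st.2 x)
          else st) := rfl

lemma altInner_length (n eid : Int) (entry : List Int)
    (st : List (List Int) × PySem.Set Int) :
    (altInner n eid entry st).1.length = st.1.length := by
  induction entry generalizing st with
  | nil => rfl
  | cons x xs ih =>
    rw [altInner_cons, ih]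
    split_ifs with h
    · simp
    · rfl

-- effect of B's inner loop on bucket t, for a valid task index t
lemma altInner_getD (n eid : Int) (t : Nat) (ht : (t : Int) < n) (entry : List Int) :
    ∀ (b : List (List Int)) (seen : PySem.Set Int), t < b.length →
    ((altInner n eid entry (b, seen)).1.getD t []) =
      if (t : Int) ∈ entry ∧ (t : Int) ∉ seen then b.getD t [] ++ [eid] else b.getD t [] := by
  induction entry with
  | nil => intro b seen hb; simp [altInner]
  | cons x xs ih =>
    intro b seen hb
    rw [altInner_cons]
    by_cases hg : 0 ≤ x ∧ x < n ∧ x ∉ seen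
    · rw [if_pos hg]
      rw [ih (b.set x.toNat ((b.getD x.toNat []) ++ [eid])) (PySem.Set.add seen x)
        (by simpa using hb)]
      by_cases hxt : x = (t : Int)
      · have htn : x.toNat = t := by omega
        have hc : ¬(((t : Int)) ∈ xs ∧ ((t : Int)) ∉ PySem.Set.add seen x) := by
          simp [PySem.Set.mem_add, hxt]
        rw [if_neg hc, htn]
        have hget : (b.set t ((b.getD t []) ++ [eid])).getD t [] = (b.getD t []) ++ [eid] := by
          rw [List.getD_eq_getElem _ _ (by simpa using hb)]
          simp [List.getElem_set_self]
        rw [hget]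
        rw [if_pos ⟨by simp [← hxt], hxt ▸ hg.2.2⟩]
      · have hxt' : ¬((t : Int) = x) := fun h => hxt h.symm
        have hne : x.toNat ≠ t := by omega
        have hget : (b.set x.toNat ((b.getD x.toNat []) ++ [eid])).getD t [] = b.getD t [] := by
          rw [List.getD_eq_getElem _ _ (by simpa using hb), List.getD_eq_getElem _ _ hb]
          rw [List.getElem_set_ne hne]
        rw [hget]
        have hmem : ((t : Int) ∈ PySem.Set.add seen x) ↔ ((t : Int) ∈ seen) := by
          simp [PySem.Set.mem_add, hxt']
        have hmem2 : ((t : Int) ∈ x :: xs) ↔ ((t : Int) ∈ xs) := by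
          simp [List.mem_cons, hxt']
        simp only [hmem, hmem2]
    · rw [if_neg hg, ih b seen hb]
      by_cases hxt : x = (t : Int)
      · have hxseen : x ∈ seen := by
          push Not at hg
          exact hg (by omega) (by omega)
        have hts : ((t : Int)) ∈ seen := hxt ▸ hxseen
        simp [hts]
      · have hxt' : ¬((t : Int) = x) := fun h => hxt h.symm
        have hmem2 : ((t : Int) ∈ x :: xs) ↔ ((t : Int) ∈ xs) := by
          simp [List.mem_cons, hxt']
        simp only [hmem2]

-- effect of B's outer loop on bucket t
lemma alt_outer_getD (n : Int) (t : Nat) (ht : (t : Int) < n) (l : List (Int × List Int)) :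
    ∀ (b : List (List Int)), t < b.length →
    ((l.foldl (fun buckets p => (altInner n p.1 p.2 (buckets, PySem.Set.ofList [])).1) b).getD t [])
      = b.getD t [] ++ (l.filter (fun p => decide ((t : Int) ∈ p.2))).map (·.1) := by
  induction l with
  | nil => intro b hb; simp
  | cons p l ih =>
    intro b hb
    simp only [List.foldl_cons, List.filter_cons]
    rw [ih _ (by rw [altInner_length]; exact hb)]
    rw [altInner_getD n p.1 t ht p.2 b (PySem.Set.ofList []) hb]
    by_cases h : (t : Int) ∈ p.2 <;> simp [h, PySem.Set.ofList]

lemma alt_outer_length (n : Int) (l : List (Int × List Int)) (b : List (List Int)) :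
    (l.foldl (fun buckets p => (altInner n p.1 p.2 (buckets, PySem.Set.ofList [])).1) b).length
      = b.length := by
  induction l generalizing b with
  | nil => rfl
  | cons p l ih => simp only [List.foldl_cons]; rw [ih, altInner_length]

-- ===== VERDICT (by name: the statement is the Claim_ definition above) =====
theorem get_task_lookup_spec : Claim_equal_get_task_lookup := by
  intro task_lst tll _
  unfold Spec_get_task_lookup
  rw [a_eq_map]
  unfold get_task_lookup_alt
  apply List.ext_getElem
  · rw [alt_outer_length]
    simp [PySem.List.length_pyRange_one]
  · intro i h1 h2
    have hi : i < task_lst.length := by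
      simpa [PySem.List.length_pyRange_one] using h1
    have hblen : i < (List.replicate task_lst.length ([] : List Int)).length := by simpa using hi
    rw [List.getElem_map, PySem.List.getElem_pyRange_one]
    rw [← List.getD_eq_getElem _ [] h2]
    rw [alt_outer_getD (task_lst.length : Int) i (by exact_mod_cast hi) _ _ hblen]
    simp
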